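-- pv_equiv track=rewrite | github.com/siavashre/OMKar | scripts/utill.py | find_start_end
-- ===== SOURCE A (Python) =====
-- def find_start_end(prev_point, start, label_list):
--     """
--     Finds the start and end of a segment given a list of labels.
--
--     Args:
--         prev_point (int): Previous point position.
--         start (int): Start position of the current segment.
--         label_list (list): List of positions.
--
--     Returns:
--         tuple: Start and end positions for the segment.
--     """
--     ans = []
--     for i in label_list:
--         if prev_point <= i < start:
--             ans.append(i)
--     if len(ans) < 2:
--         return 0, 0
--     else:
--         return min(min(ans)+1, prev_point+1), start-1
-- ===== SOURCE B (Python) =====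
-- def find_start_end(prev_point, start, label_list):
--     count = 0
--     for i in label_list:
--         if prev_point <= i < start:
--             count += 1
--             if count >= 2:
--                 return prev_point + 1, start - 1
--     return 0, 0
-- ===== Notes on version B (the rewrite author's own statement) =====
-- stated objective: simpler
-- what changed: Replaces collect-into-list + length test + min() pass by a single short-circuiting scan with an integer counter that returns (prev_point+1, start-1) as soon as two in-range labels are seen (min(ans)>=prev_point makes A's min term always prev_point+1).
import Mathlib
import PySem

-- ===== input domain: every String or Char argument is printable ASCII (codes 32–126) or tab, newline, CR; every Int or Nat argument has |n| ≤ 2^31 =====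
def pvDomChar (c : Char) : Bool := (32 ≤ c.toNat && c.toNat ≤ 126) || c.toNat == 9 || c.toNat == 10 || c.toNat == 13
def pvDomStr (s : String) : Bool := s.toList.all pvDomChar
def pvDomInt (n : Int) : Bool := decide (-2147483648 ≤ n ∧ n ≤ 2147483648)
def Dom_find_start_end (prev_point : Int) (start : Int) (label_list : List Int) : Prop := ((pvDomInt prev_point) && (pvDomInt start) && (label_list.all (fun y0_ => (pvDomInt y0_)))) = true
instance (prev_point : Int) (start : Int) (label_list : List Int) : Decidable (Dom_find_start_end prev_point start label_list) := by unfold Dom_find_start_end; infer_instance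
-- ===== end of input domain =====

-- B replaces A's collect-list + length test + min() pass by one short-circuiting counting scan (simpler, O(1) space); return value proved equal on all inputs.


-- ===== PORT A =====
def find_start_end (prev_point : Int) (start : Int) (label_list : List Int) : Int × Int :=
  -- ans = []; for i in label_list: if prev_point <= i < start: ans.append(i)
  let ans := label_list.foldl (fun acc i => if prev_point ≤ i ∧ i < start then acc ++ [i] else acc) []
  if ans.length < 2 then (0, 0)
  else
    match PySem.List.min? ans (fun x => x) with   -- min(ans); ans is nonempty here
    | some m => (min (m + 1) (prev_point + 1), start - 1)
    | none => (0, 0)  -- unreachable: ans.length ≥ 2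

-- ===== PORT B =====
def fseAltLoop (prev_point : Int) (start : Int) : List Int → Int → Int × Int
  | [], _ => (0, 0)
  | i :: rest, count =>
    if prev_point ≤ i ∧ i < start then
      if count + 1 ≥ 2 then (prev_point + 1, start - 1)
      else fseAltLoop prev_point start rest (count + 1)
    else fseAltLoop prev_point start rest count

def find_start_end_alt (prev_point : Int) (start : Int) (label_list : List Int) : Int × Int :=
  fseAltLoop prev_point start label_list 0

-- ===== PRECONDITION & SPEC =====
def Spec_find_start_end (prev_point : Int) (start : Int) (label_list : List Int) (out : Int × Int) : Prop := out = find_start_end_alt prev_point start label_list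
instance (prev_point : Int) (start : Int) (label_list : List Int) (out : Int × Int) : Decidable (Spec_find_start_end prev_point start label_list out) := by unfold Spec_find_start_end; infer_instance

-- ===== CLAIM (what is proved, stated in full; the proofs are below) =====
def Claim_equal_find_start_end : Prop := ∀ (prev_point : Int) (start : Int) (label_list : List Int), Dom_find_start_end prev_point start label_list → Spec_find_start_end prev_point start label_list (find_start_end prev_point start label_list)

-- ===== LEMMAS AND PROOFS =====

-- B's loop computes "two in-range labels seen?" of the remaining list plus the counter.
theorem fseAltLoop_spec (prev_point start : Int) (xs : List Int) (c : Int)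
    (hc : c = 0 ∨ c = 1) :
    fseAltLoop prev_point start xs c =
      if 2 ≤ c + (xs.countP (fun i => decide (prev_point ≤ i ∧ i < start)) : Int)
      then (prev_point + 1, start - 1) else (0, 0) := by
  induction xs generalizing c with
  | nil =>
    simp only [fseAltLoop, List.countP_nil, Nat.cast_zero, add_zero]
    rw [if_neg (by omega)]
  | cons i rest ih =>
    rw [show fseAltLoop prev_point start (i :: rest) c =
        (if prev_point ≤ i ∧ i < start then
          (if c + 1 ≥ 2 then (prev_point + 1, start - 1)
           else fseAltLoop prev_point start rest (c + 1))
         else fseAltLoop prev_point start rest c) from rfl]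
    simp only [List.countP_cons]
    by_cases hp : prev_point ≤ i ∧ i < start
    · rw [if_pos hp]
      have hcnt : (((rest.countP (fun i => decide (prev_point ≤ i ∧ i < start)) +
          if decide (prev_point ≤ i ∧ i < start) = true then 1 else 0 : Nat)) : Int)
          = (rest.countP (fun i => decide (prev_point ≤ i ∧ i < start)) : Int) + 1 := by
        simp [hp]
      rw [hcnt]
      rcases hc with hc | hc
      · subst hc
        rw [if_neg (by omega), ih (0 + 1) (by omega)]
        have h0 : (0 : Int) + 1 = 1 := by omega
        rw [h0]
        by_cases h : 2 ≤ 1 + (rest.countP (fun i => decide (prev_point ≤ i ∧ i < start)) : Int)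
        · rw [if_pos h, if_pos (by omega)]
        · rw [if_neg h, if_neg (by omega)]
      · subst hc
        rw [if_pos (by omega), if_pos (by
          have : (0:Int) ≤ (rest.countP (fun i => decide (prev_point ≤ i ∧ i < start)) : Int) :=
            Int.natCast_nonneg _
          omega)]
    · rw [if_neg hp, ih c hc]
      have hcnt : (((rest.countP (fun i => decide (prev_point ≤ i ∧ i < start)) +
          if decide (prev_point ≤ i ∧ i < start) = true then 1 else 0 : Nat)) : Int)
          = (rest.countP (fun i => decide (prev_point ≤ i ∧ i < start)) : Int) := by
        simp [hp]
      rw [hcnt]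

theorem fse_ans_eq_filter (prev_point start : Int) (label_list : List Int) :
    label_list.foldl (fun acc i => if prev_point ≤ i ∧ i < start then acc ++ [i] else acc) [] =
      label_list.filter (fun i => decide (prev_point ≤ i ∧ i < start)) := by
  have := PySem.List.foldl_append_ite_eq_filter
    (p := fun i => prev_point ≤ i ∧ i < start) (l := label_list) (acc := [])
  simpa using this

-- ===== VERDICT (by name: the statement is the Claim_ definition above) =====
theorem find_start_end_spec : Claim_equal_find_start_end := by
  intro prev_point start label_list _
  unfold Spec_find_start_end find_start_end find_start_end_alt
  rw [fse_ans_eq_filter, fseAltLoop_spec prev_point start label_list 0 (Or.inl rfl)]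
  simp only [zero_add]
  set p := fun i => decide (prev_point ≤ i ∧ i < start) with hp
  have hlen : (label_list.filter p).length = label_list.countP p :=
    List.countP_eq_length_filter.symm
  by_cases h2 : (label_list.filter p).length < 2
  · rw [if_pos h2, if_neg (by rw [hlen] at h2; exact_mod_cast by omega)]
  · rw [if_neg h2, if_pos (by rw [hlen] at h2; exact_mod_cast by omega)]
    have hne : label_list.filter p ≠ [] := by
      intro h; rw [h] at h2; simp at h2
    rcases hm : PySem.List.min? (label_list.filter p) (fun x => x) with _ | m
    · exact absurd ((PySem.List.min?_eq_none_iff _ _).mp hm) hne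
    · have hmem : m ∈ label_list.filter p := PySem.List.min?_mem hm
      have hpm : prev_point ≤ m := by
        have := List.of_mem_filter hmem
        rw [hp] at this
        simp only [decide_eq_true_eq] at this
        exact this.1
      dsimp only
      rw [min_eq_right (by omega : prev_point + 1 ≤ m + 1)]
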